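-- pv_equiv track=rewrite | github.com/malikrafsan/LeetCode-Submission | 686-repeated-string-match/repeated-string-match.py | check
-- ===== SOURCE A (Python) =====
-- def check(a: str, b: str, fi: int) -> int:
--     la = len(a)
--     lb = len(b)
--
--     cnt = 0
--     for idx, c in enumerate(b):
--         # idx = 3, c = 'b', fi=2, la=4
--
--         if c != a[(idx + fi) % la]:
--             return -1
--
--     added = 0
--     if fi != 0:
--         lb = lb-(la-fi)
--         added = 1
--
--     mul = lb // la
--     rest = 1 if lb % la != 0 else 0
--     return added + mul + rest
-- ===== SOURCE B (Python) =====
-- def check(a: str, b: str, fi: int) -> int: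
--     la = len(a)
--     lb = len(b)
--     count = -(-(fi + lb) // la)          # ceil((fi+lb)/la); raises ZeroDivisionError when a == "" like A
--     start = fi % la
--     reps = -(-(start + lb) // la)
--     s = a * reps
--     return count if s[start:start + lb] == b else -1
-- ===== Notes on version B (the rewrite author's own statement) =====
-- stated objective: simpler
-- what changed: Replaces A's per-character modular-index loop plus piecewise count arithmetic (added/mul/rest) with a closed-form ceiling count -(-(fi+len(b))//len(a)) and a single slice comparison against the repeated string.
import Mathlib
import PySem

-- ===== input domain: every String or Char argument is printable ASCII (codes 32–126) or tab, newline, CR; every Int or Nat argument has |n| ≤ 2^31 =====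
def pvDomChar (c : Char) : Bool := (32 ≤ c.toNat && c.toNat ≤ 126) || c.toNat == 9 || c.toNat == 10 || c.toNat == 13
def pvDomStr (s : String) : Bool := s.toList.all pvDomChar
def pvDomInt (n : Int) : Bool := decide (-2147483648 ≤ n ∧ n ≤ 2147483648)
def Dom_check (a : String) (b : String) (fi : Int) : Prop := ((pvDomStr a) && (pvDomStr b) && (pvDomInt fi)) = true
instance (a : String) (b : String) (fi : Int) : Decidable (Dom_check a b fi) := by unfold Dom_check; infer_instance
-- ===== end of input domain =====

-- B replaces A's per-character modular loop and piecewise count arithmetic with a closed-form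
-- ceiling count plus a single slice comparison against the repeated string (objective: simpler).

-- ===== PORT A =====
-- the 'for idx, c in enumerate(b)' loop: true = no mismatch, false = 'return -1' fired
-- (a[(idx+fi)%la]: pyGet? none — resp. mod by zero — only occurs for a = "", which Pre_check excludes)
def checkLoop (aL : List Char) (la : Int) (fi : Int) : List (Int × Char) → Bool
  | [] => true
  | (idx, c) :: rest =>
    match PySem.List.pyGet? aL (PySem.Int.mod (idx + fi) la) with
    | none => false
    | some ch => if c != ch then false else checkLoop aL la fi rest

def check (a : String) (b : String) (fi : Int) : Int :=
  let la := PySem.Str.len a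
  let lb := PySem.Str.len b
  if checkLoop a.toList la fi (PySem.List.enumerate b.toList 0) then
    let lb2 := if fi ≠ 0 then lb - (la - fi) else lb
    let added : Int := if fi ≠ 0 then 1 else 0
    let mul := PySem.Int.floordiv lb2 la
    let rest : Int := if PySem.Int.mod lb2 la ≠ 0 then 1 else 0
    added + mul + rest
  else -1

-- ===== PORT B =====
def check_alt (a : String) (b : String) (fi : Int) : Int :=
  let la := PySem.Str.len a
  let lb := PySem.Str.len b
  let count := -(PySem.Int.floordiv (-(fi + lb)) la)
  let start := PySem.Int.mod fi la
  let reps := -(PySem.Int.floordiv (-(start + lb)) la)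
  let s := PySem.List.pyRepeat a.toList reps
  if PySem.List.slice s (some start) (some (start + lb)) = b.toList then count else -1

-- ===== PRECONDITION & SPEC =====
-- Pre_check excludes a = "" only: there Python A raises ZeroDivisionError ((idx+fi) % 0, or lb // 0).
def Pre_check (a : String) (b : String) (fi : Int) : Prop := a.toList ≠ []
instance (a : String) (b : String) (fi : Int) : Decidable (Pre_check a b fi) := by unfold Pre_check; infer_instance
def pvWitness_check : String × String × Int := ("ab", "ba", 1)

def Spec_check (a : String) (b : String) (fi : Int) (out : Int) : Prop := out = check_alt a b fi
instance (a : String) (b : String) (fi : Int) (out : Int) : Decidable (Spec_check a b fi out) := by unfold Spec_check; infer_instance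

-- ===== CLAIM (what is proved, stated in full; the proofs are below) =====
def Claim_equal_check : Prop := ∀ (a : String) (b : String) (fi : Int), Dom_check a b fi → Pre_check a b fi → Spec_check a b fi (check a b fi)

-- ===== LEMMAS AND PROOFS =====

-- the common characterisation: the list [a[(t+0)%la], a[(t+1)%la], …, a[(t+m-1)%la]]
def wrapped (L : List Char) (t : Int) (m : Nat) : List Char :=
  (List.range m).map (fun (i : Nat) => L.getD (PySem.Int.mod (t + (i : Int)) L.length).toNat ' ')

theorem wrapped_zero (L : List Char) (t : Int) : wrapped L t 0 = [] := rfl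

theorem wrapped_succ (L : List Char) (t : Int) (m : Nat) :
    wrapped L t (m + 1) =
      L.getD (PySem.Int.mod t L.length).toNat ' ' :: wrapped L (t + 1) m := by
  unfold wrapped
  rw [List.range_succ_eq_map, List.map_cons, List.map_map]
  congr 1
  · norm_num
  · apply List.map_congr_left
    intro i _
    have h : t + ((Nat.succ i : Nat) : Int) = (t + 1) + (i : Int) := by push_cast; ring
    simp only [Function.comp_apply, h]

theorem pyGet?_mod (L : List Char) (t : Int) (hn : L ≠ []) :
    PySem.List.pyGet? L (PySem.Int.mod t L.length) =
      some (L.getD (PySem.Int.mod t L.length).toNat ' ') := by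
  have hpos : (0:Int) < L.length := by
    simpa using List.length_pos_iff.mpr hn
  have h0 := PySem.Int.mod_nonneg t hpos
  have h1 := PySem.Int.mod_lt t hpos
  have hc : PySem.Int.mod t (L.length : Int) = ((PySem.Int.mod t L.length).toNat : Int) := by omega
  rw [hc, PySem.List.pyGet?_natCast]
  rw [List.getElem?_eq_getElem (by omega), List.getD_eq_getElem?_getD,
    List.getElem?_eq_getElem (by omega)]
  rfl

theorem loop_iff (L : List Char) (fi : Int) (hn : L ≠ []) :
    ∀ (B : List Char) (k : Int),
      (checkLoop L (L.length : Int) fi (PySem.List.enumerate B k) = true ↔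
        B = wrapped L (k + fi) B.length) := by
  intro B
  induction B with
  | nil => intro k; simp [PySem.List.enumerate_nil, checkLoop, wrapped_zero]
  | cons c rest ih =>
    intro k
    rw [PySem.List.enumerate_cons]
    rw [show checkLoop L (L.length : Int) fi ((k, c) :: PySem.List.enumerate rest (k + 1)) =
        (match PySem.List.pyGet? L (PySem.Int.mod (k + fi) (L.length : Int)) with
         | none => false
         | some ch => if c != ch then false
             else checkLoop L (L.length : Int) fi (PySem.List.enumerate rest (k + 1))) from rfl]
    rw [pyGet?_mod L (k + fi) hn]
    have he : k + 1 + fi = k + fi + 1 := by ring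
    simp only [List.length_cons, wrapped_succ, List.cons_eq_cons]
    cases hb : (c != L.getD (PySem.Int.mod (k + fi) L.length).toNat ' ') with
    | false =>
      have hcc : c = L.getD (PySem.Int.mod (k + fi) L.length).toNat ' ' := by
        simpa using hb
      rw [if_neg Bool.false_ne_true, ih (k + 1), he]
      simp [hcc]
    | true =>
      have hcc : ¬ c = L.getD (PySem.Int.mod (k + fi) L.length).toNat ' ' := by
        simpa using hb
      rw [if_pos rfl]
      constructor
      · intro h; exact absurd h Bool.false_ne_true
      · rintro ⟨h1, -⟩; exact absurd h1 hcc

theorem length_pyRepeat (L : List Char) (m : Nat) :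
    (PySem.List.pyRepeat L (m : Int)).length = m * L.length := by
  unfold PySem.List.pyRepeat
  rw [List.length_flatten]
  simp [List.map_replicate, List.sum_replicate, smul_eq_mul]

theorem getElem?_flatten_replicate (L : List Char) (m j : Nat) (hj : j < m * L.length) :
    (List.replicate m L).flatten[j]? = L[j % L.length]? := by
  induction m generalizing j with
  | zero => rw [Nat.zero_mul] at hj; omega
  | succ m ih =>
    rw [Nat.succ_mul] at hj
    rw [List.replicate_succ, List.flatten_cons, List.getElem?_append]
    by_cases h : j < L.length
    · rw [if_pos h, Nat.mod_eq_of_lt h]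
    · rw [if_neg h]
      rw [ih (j - L.length) (by omega)]
      congr 1
      have hcast : j = j - L.length + L.length := by omega
      conv_rhs => rw [hcast, Nat.add_mod_right]

-- the slice in B equals the wrapped list (a ≠ [], any fi, lb = B.length)
theorem slice_eq_wrapped (L : List Char) (fi : Int) (m : Nat) (hn : L ≠ []) :
    PySem.List.slice
        (PySem.List.pyRepeat L
          (-(PySem.Int.floordiv (-(PySem.Int.mod fi L.length + (m : Int))) L.length)))
        (some (PySem.Int.mod fi L.length))
        (some (PySem.Int.mod fi L.length + (m : Int))) =
      wrapped L fi m := by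
  have hpos : (0:Int) < L.length := by simpa using List.length_pos_iff.mpr hn
  set start := PySem.Int.mod fi L.length with hstart
  have h0 : 0 ≤ start := PySem.Int.mod_nonneg fi hpos
  have h1 : start < L.length := PySem.Int.mod_lt fi hpos
  set reps := -(PySem.Int.floordiv (-(start + (m : Int))) L.length) with hreps
  have hbr : (reps - 1) * (L.length : Int) < start + m ∧ start + (m:Int) ≤ reps * L.length :=
    (PySem.Int.neg_floordiv_neg_eq_iff_of_pos hpos).mp rfl
  have hreps0 : 0 ≤ reps := by nlinarith [hbr.1, hbr.2]
  have hrepsNat : reps = (reps.toNat : Int) := by omega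
  have hlen : (PySem.List.pyRepeat L reps).length = reps.toNat * L.length := by
    rw [hrepsNat]; exact length_pyRepeat L reps.toNat
  have hcap : start.toNat + m ≤ reps.toNat * L.length := by
    have : ((reps.toNat * L.length : Nat) : Int) = reps * L.length := by
      push_cast; rw [← hrepsNat]
    omega
  rw [PySem.List.slice_toNat _ h0 (by omega)]
  have hsub : (start + (m:Int)).toNat - start.toNat = m := by omega
  rw [hsub]
  apply List.ext_getElem?
  intro i
  by_cases hi : i < m
  · rw [List.getElem?_take_of_lt hi, List.getElem?_drop]
    have hidx : start.toNat + i < reps.toNat * L.length := by omega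
    unfold PySem.List.pyRepeat
    rw [← hrepsNat] at *
    have : (List.replicate reps.toNat L).flatten[start.toNat + i]? = L[(start.toNat + i) % L.length]? := by
      have := getElem?_flatten_replicate L reps.toNat (start.toNat + i) (by
        rw [hrepsNat] at hidx ⊢; simpa using hidx)
      rw [hrepsNat]; simpa using this
    rw [this]
    -- right side
    unfold wrapped
    rw [List.getElem?_map, List.getElem?_range hi]
    simp only [Option.map_some]
    have hmods : PySem.Int.mod (fi + (i:Int)) L.length = (((start.toNat + i) % L.length : Nat) : Int) := by
      rw [PySem.Int.mod_eq_emod_of_pos hpos]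
      have hfi : fi % (L.length : Int) = start := by
        rw [hstart, PySem.Int.mod_eq_emod_of_pos hpos]
      push_cast
      rw [← Int.emod_add_emod, hfi]
      congr 1
      omega
    rw [hmods]
    have hlt : (start.toNat + i) % L.length < L.length := Nat.mod_lt _ (by
      have : 0 < L.length := List.length_pos_iff.mpr hn; omega)
    rw [Int.toNat_natCast, List.getElem?_eq_getElem hlt, List.getD_eq_getElem?_getD,
      List.getElem?_eq_getElem hlt]
    rfl
  · rw [List.getElem?_eq_none, List.getElem?_eq_none]
    · unfold wrapped; simp; omega
    · rw [List.length_take]; omega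

-- ceiling division -((-x)//la) in closed form against quotient/remainder
theorem ceil_closed (la q r : Int) (hla : 0 < la) (hr0 : 0 ≤ r) (hr1 : r < la) :
    -(PySem.Int.floordiv (-(q * la + r)) la) = q + (if r ≠ 0 then 1 else 0) := by
  rw [PySem.Int.neg_floordiv_neg_eq_iff_of_pos hla]
  split_ifs with h
  · have hr2 : 0 < r := lt_of_le_of_ne hr0 (Ne.symm h)
    constructor
    · have e : (q + 1 - 1) * la = q * la := by ring
      rw [e]; linarith
    · have e : (q + 1) * la = q * la + la := by ring
      rw [e]; linarith
  · have hr : r = 0 := by omega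
    constructor
    · have e : (q + 0 - 1) * la = q * la - la := by ring
      rw [e]; linarith
    · have e : (q + 0) * la = q * la := by ring
      rw [e]; linarith

-- A's piecewise count arithmetic equals B's closed-form ceiling (a non-empty)
theorem count_eq (la fi lb : Int) (hla : 0 < la) :
    (if fi ≠ 0 then (1:Int) else 0) +
        PySem.Int.floordiv (if fi ≠ 0 then lb - (la - fi) else lb) la +
        (if PySem.Int.mod (if fi ≠ 0 then lb - (la - fi) else lb) la ≠ 0 then 1 else 0) =
      -(PySem.Int.floordiv (-(fi + lb)) la) := by
  by_cases h1 : fi = 0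
  · simp only [h1, ne_eq, not_true_eq_false, if_false]
    set q := PySem.Int.floordiv lb la with hq
    set r := PySem.Int.mod lb la with hr
    have hqr : q * la + r = lb := PySem.Int.floordiv_mul_add_mod lb la
    have hr0 : 0 ≤ r := PySem.Int.mod_nonneg lb hla
    have hr1 : r < la := PySem.Int.mod_lt lb hla
    have hx : (0:Int) + lb = q * la + r := by linarith
    rw [hx, ceil_closed la q r hla hr0 hr1]
    split_ifs <;> omega
  · simp only [h1, ne_eq, not_false_eq_true, if_true]
    set q := PySem.Int.floordiv (lb - (la - fi)) la with hq
    set r := PySem.Int.mod (lb - (la - fi)) la with hr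
    have hqr : q * la + r = lb - (la - fi) := PySem.Int.floordiv_mul_add_mod (lb - (la - fi)) la
    have hr0 : 0 ≤ r := PySem.Int.mod_nonneg (lb - (la - fi)) hla
    have hr1 : r < la := PySem.Int.mod_lt (lb - (la - fi)) hla
    have hx : fi + lb = (q + 1) * la + r := by linarith
    rw [hx, ceil_closed la (q + 1) r hla hr0 hr1]
    split_ifs <;> omega

-- ===== VERDICT (by name: the statement is the Claim_ definition above) =====
theorem check_spec : Claim_equal_check := by
  intro a b fi _ hpre
  unfold Spec_check check check_alt
  have hn : a.toList ≠ [] := hpre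
  have hpos : (0:Int) < a.toList.length := by simpa using List.length_pos_iff.mpr hn
  simp only [PySem.Str.len_eq]
  have hloop := loop_iff a.toList fi hn b.toList 0
  rw [zero_add] at hloop
  have hslice := slice_eq_wrapped a.toList fi b.toList.length hn
  have e1 : (if checkLoop a.toList (a.toList.length : Int) fi (PySem.List.enumerate b.toList 0) = true
        then (if fi ≠ 0 then (1:Int) else 0) +
          PySem.Int.floordiv (if fi ≠ 0 then (b.toList.length : Int) - ((a.toList.length : Int) - fi) else (b.toList.length : Int)) (a.toList.length : Int) +
          (if PySem.Int.mod (if fi ≠ 0 then (b.toList.length : Int) - ((a.toList.length : Int) - fi) else (b.toList.length : Int)) (a.toList.length : Int) ≠ 0 then 1 else 0)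
        else -1)
      = (if b.toList = wrapped a.toList fi b.toList.length
        then (if fi ≠ 0 then (1:Int) else 0) +
          PySem.Int.floordiv (if fi ≠ 0 then (b.toList.length : Int) - ((a.toList.length : Int) - fi) else (b.toList.length : Int)) (a.toList.length : Int) +
          (if PySem.Int.mod (if fi ≠ 0 then (b.toList.length : Int) - ((a.toList.length : Int) - fi) else (b.toList.length : Int)) (a.toList.length : Int) ≠ 0 then 1 else 0)
        else -1) := if_congr hloop rfl rfl
  have e2 : (if PySem.List.slice
          (PySem.List.pyRepeat a.toList
            (-(PySem.Int.floordiv (-(PySem.Int.mod fi (a.toList.length : Int) + (b.toList.length : Int))) (a.toList.length : Int))))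
          (some (PySem.Int.mod fi (a.toList.length : Int)))
          (some (PySem.Int.mod fi (a.toList.length : Int) + (b.toList.length : Int))) = b.toList
        then -(PySem.Int.floordiv (-(fi + (b.toList.length : Int))) (a.toList.length : Int))
        else -1)
      = (if b.toList = wrapped a.toList fi b.toList.length
        then -(PySem.Int.floordiv (-(fi + (b.toList.length : Int))) (a.toList.length : Int))
        else -1) := if_congr (by rw [hslice]; exact eq_comm) rfl rfl
  rw [e1, e2]
  by_cases hm : b.toList = wrapped a.toList fi b.toList.length
  · rw [if_pos hm, if_pos hm]
    exact count_eq (a.toList.length : Int) fi (b.toList.length : Int) hpos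
  · rw [if_neg hm, if_neg hm]
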